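-- pv_equiv track=rewrite | github.com/kimhaech/algorithm_study | 힙/더맵게.py | solution
-- ===== SOURCE A (Python) =====
-- import heapq
--
-- def solution(scoville, K):
--     answer = 0
--     heapq.heapify(scoville)
--
--     while scoville[0] < K:
--         if len(scoville) == 1:
--             return -1
--         minn = heapq.heappop(scoville)
--         sec = heapq.heappop(scoville)
--         heapq.heappush(scoville, minn + 2*sec)
--
--         answer += 1
-- #     scoville.sort(reverse=True) # 정렬
--
-- #     while scoville[-1] < K: # 모든 음식의 맵기가 K이상일 때 까지 반복
-- #         if len(scoville) == 1 and scoville[0] < K: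
-- #             return -1
-- #         else:
-- #             minn = scoville.pop()
-- #             sec = scoville[-1]
-- #             scoville[-1] = minn + 2*sec
-- #             scoville.sort(reverse=True)
-- #         answer += 1
--
--     return answer
-- ===== SOURCE B (Python) =====
-- def solution(scoville, K):
--     # sort once, then keep a sorted list: pop the two smallest from the
--     # front and re-insert the combined value by a scan-insert
--     s = sorted(scoville)
--     answer = 0
--     while s[0] < K:
--         if len(s) == 1:
--             return -1
--         combined = s[0] + 2 * s[1]
--         rest = s[2:]
--         i = 0
--         while i < len(rest) and rest[i] <= combined:
--             i += 1
--         rest.insert(i, combined)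
--         s = rest
--         answer += 1
--     return answer
-- ===== Notes on version B (the rewrite author's own statement) =====
-- stated objective: alternative
-- what changed: Replaces the binary heap with a list sorted once up front, popping the two smallest from the front and re-inserting the combined value by a scan-insert that keeps the list sorted.
import Mathlib
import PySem

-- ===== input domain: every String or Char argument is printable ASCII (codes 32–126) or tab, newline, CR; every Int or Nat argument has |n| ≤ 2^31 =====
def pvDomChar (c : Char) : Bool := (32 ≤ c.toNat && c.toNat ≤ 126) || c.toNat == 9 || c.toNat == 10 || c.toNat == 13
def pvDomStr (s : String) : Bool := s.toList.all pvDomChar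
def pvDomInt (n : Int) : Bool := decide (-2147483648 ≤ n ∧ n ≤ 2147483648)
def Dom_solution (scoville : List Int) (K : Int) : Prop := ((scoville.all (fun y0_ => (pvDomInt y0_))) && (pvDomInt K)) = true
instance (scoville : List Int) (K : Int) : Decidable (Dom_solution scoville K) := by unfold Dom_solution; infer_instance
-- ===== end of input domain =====

-- B replaces the heap by a once-sorted list with scan-insert re-insertion (alternative data
-- structure, not faster); equivalence is about the RETURN value only — Python A heapifies its
-- argument in place, B leaves it unchanged.

-- ===== PORT A =====
-- A's heap is modelled by its contents: heapq.heappop returns the minimum of the heap and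
-- removes one occurrence of it, heapq.heappush adds the element, scoville[0] of a heap is its
-- minimum; this is the contract of the heapq library calls A makes (exact for the returned value).
def heapLoop (h : List Int) (K ans : Int) : Int :=
  match hm : PySem.List.min? h (fun x => x) with
  | none => ans            -- empty heap: unreachable under Pre_ (Python raises IndexError)
  | some m =>
    if m < K then
      if h.length = 1 then -1
      else
        let h1 := h.erase m                       -- minn = heappop(scoville)
        match hm2 : PySem.List.min? h1 (fun x => x) with
        | none => ans       -- unreachable: the heap has ≥ 2 elements here
        | some s2 =>
          heapLoop ((h1.erase s2).concat (m + 2 * s2)) K (ans + 1)   -- heappush(minn + 2*sec)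
    else ans
termination_by h.length
decreasing_by
  have hm' : m ∈ h := PySem.List.min?_mem hm
  have hs' : s2 ∈ h.erase m := PySem.List.min?_mem hm2
  have h1 : (h.erase m).length = h.length - 1 := List.length_erase_of_mem hm'
  have h2 : ((h.erase m).erase s2).length = (h.erase m).length - 1 := List.length_erase_of_mem hs'
  have h3 : 0 < (h.erase m).length := List.length_pos_of_mem hs'
  simp only [List.concat_eq_append, List.length_append, List.length_cons, List.length_nil]
  omega

def solution (scoville : List Int) (K : Int) : Int :=
  heapLoop scoville K 0

-- ===== PORT B =====
-- i = 0; while i < len(rest) and rest[i] <= combined: i += 1   (the scan for the insertion point)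
def scanPos (c : Int) : List Int → Nat
  | [] => 0
  | z :: t => if z ≤ c then scanPos c t + 1 else 0

def altLoop (s : List Int) (K ans : Int) : Int :=
  match s with
  | [] => ans              -- empty list: unreachable under Pre_ (Python raises IndexError)
  | [x] => if x < K then -1 else ans
  | x :: y :: rest =>
    if x < K then
      let c := x + 2 * y
      altLoop (PySem.List.insert rest (scanPos c rest) c) K (ans + 1)   -- rest.insert(i, combined)
    else ans
termination_by s.length
decreasing_by
  simp [PySem.List.length_insert]

def solution_alt (scoville : List Int) (K : Int) : Int :=
  altLoop (PySem.List.sorted scoville (fun x => x) false) K 0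

-- ===== PRECONDITION & SPEC =====
-- Pre_ excludes only the empty list, on which Python A raises IndexError (scoville[0]).
def Pre_solution (scoville : List Int) (K : Int) : Prop := scoville ≠ []
instance (scoville : List Int) (K : Int) : Decidable (Pre_solution scoville K) := by unfold Pre_solution; infer_instance
def pvWitness_solution : List Int × Int := ([2, 3, 5], 7)

def Spec_solution (scoville : List Int) (K : Int) (out : Int) : Prop := out = solution_alt scoville K
instance (scoville : List Int) (K : Int) (out : Int) : Decidable (Spec_solution scoville K out) := by unfold Spec_solution; infer_instance

-- ===== CLAIM (what is proved, stated in full; the proofs are below) =====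
def Claim_equal_solution : Prop := ∀ (scoville : List Int) (K : Int), Dom_solution scoville K → Pre_solution scoville K → Spec_solution scoville K (solution scoville K)

-- ===== LEMMAS AND PROOFS =====

-- PySem.List.insert at an in-range natural index is take/drop insertion
theorem insert_natCast (xs : List Int) (v : Int) (i : Nat) (h : i ≤ xs.length) :
    PySem.List.insert xs (i : Int) v = xs.take i ++ v :: xs.drop i := by
  have h1 : min (i:ℤ) (xs.length:ℤ) = (i:ℤ) := by omega
  have h2 : ¬ ((i:ℤ) < 0) := by omega
  simp [PySem.List.insert, PySem.List.sliceIndices, h1, h2]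

theorem scanPos_le (c : Int) (t : List Int) : scanPos c t ≤ t.length := by
  induction t with
  | nil => simp [scanPos]
  | cons z t ih => simp only [scanPos, List.length_cons]; split <;> omega

-- scan-insert unfolds as the obvious recursion
theorem ins_cons (c z : Int) (t : List Int) :
    PySem.List.insert (z :: t) (scanPos c (z :: t)) c =
      if z ≤ c then z :: PySem.List.insert t (scanPos c t) c
      else c :: z :: t := by
  rw [insert_natCast _ _ _ (scanPos_le c (z :: t))]
  by_cases h : z ≤ c
  · rw [insert_natCast _ _ _ (scanPos_le c t)]
    simp [scanPos, h]
  · simp [scanPos, h]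

theorem ins_perm (c : Int) (t : List Int) :
    (PySem.List.insert t (scanPos c t) c).Perm (c :: t) := by
  induction t with
  | nil => simp [scanPos, PySem.List.insert_zero]
  | cons z t ih =>
    rw [ins_cons]
    by_cases h : z ≤ c
    · simp only [h, if_true]
      exact (ih.cons z).trans (List.Perm.swap c z t)
    · simp [h]

theorem ins_pairwise (c : Int) (t : List Int) (ht : t.Pairwise (· ≤ ·)) :
    (PySem.List.insert t (scanPos c t) c).Pairwise (· ≤ ·) := by
  induction t with
  | nil => simp [scanPos, PySem.List.insert_zero]
  | cons z t ih =>
    rw [ins_cons]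
    rcases List.pairwise_cons.mp ht with ⟨hz, ht'⟩
    by_cases h : z ≤ c
    · simp only [h, if_true]
      refine List.pairwise_cons.mpr ⟨?_, ih ht'⟩
      intro a ha
      have := (ins_perm c t).mem_iff.mp ha
      rcases List.mem_cons.mp this with rfl | hmem
      · exact h
      · exact hz a hmem
    · simp only [h, if_false]
      refine List.pairwise_cons.mpr ⟨?_, ht⟩
      intro a ha
      rcases List.mem_cons.mp ha with rfl | hmem
      · omega
      · exact le_trans (by omega) (hz a hmem)

-- the minimum of any permutation of a ≤-sorted list is its head
theorem min?_perm_sorted {h : List Int} {x : Int} {s' : List Int}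
    (hp : h.Perm (x :: s')) (hs : (x :: s').Pairwise (· ≤ ·)) :
    PySem.List.min? h (fun v => v) = some x := by
  have hne : h ≠ [] := by
    intro he; subst he; exact (List.cons_ne_nil x s') hp.symm.eq_nil
  obtain ⟨m, hm⟩ : ∃ m, PySem.List.min? h (fun v => v) = some m := by
    cases hmm : PySem.List.min? h (fun v => v) with
    | none => exact absurd ((PySem.List.min?_eq_none_iff h (fun v => v)).mp hmm) hne
    | some m => exact ⟨m, rfl⟩
  have hmem : m ∈ h := PySem.List.min?_mem hm
  have hmin : ∀ y ∈ h, m ≤ y := by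
    intro y hy; exact PySem.List.min?_isMin hm y hy
  have hxh : x ∈ h := hp.mem_iff.mpr (List.mem_cons_self)
  have hmx : m ≤ x := hmin x hxh
  have hxm : x ≤ m := by
    have hms : m ∈ x :: s' := hp.mem_iff.mp hmem
    rcases List.mem_cons.mp hms with rfl | hmem'
    · exact le_refl _
    · exact (List.pairwise_cons.mp hs).1 m hmem'
  rw [hm, le_antisymm hmx hxm]

-- main invariant: heap contents ~ sorted list ⇒ both loops return the same answer
theorem loop_eq (n : Nat) : ∀ (h s : List Int) (K ans : Int), h.length = n →
    h.Perm s → s.Pairwise (· ≤ ·) → heapLoop h K ans = altLoop s K ans := by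
  induction n with
  | zero =>
    intro h s K ans hlen hp hsort
    have : h = [] := List.eq_nil_of_length_eq_zero hlen
    subst this
    have : s = [] := hp.symm.eq_nil
    subst this
    rw [heapLoop, altLoop]
    simp [PySem.List.min?]
  | succ n ih =>
    intro h s K ans hlen hp hsort
    match s with
    | [] => exact absurd hp.eq_nil (by intro he; simp [he] at hlen)
    | x :: s' =>
      have hmin : PySem.List.min? h (fun v => v) = some x := min?_perm_sorted hp hsort
      match s' with
      | [] =>
        have hl1 : h.length = 1 := by rw [hp.length_eq]; rfl
        rw [heapLoop, altLoop]
        split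
        · next heq => rw [hmin] at heq; exact absurd heq (by simp)
        · next m heq =>
          rw [hmin] at heq
          cases Option.some.injEq _ _ ▸ heq.symm
          simp [hl1]
      | y :: rest =>
        rw [heapLoop, altLoop]
        have hl : h.length = rest.length + 2 := by simp [hp.length_eq]
        have hne1 : ¬ h.length = 1 := by omega
        split
        · next heq => rw [hmin] at heq; exact absurd heq (by simp)
        · next m heq =>
          rw [hmin] at heq
          have hmx : m = x := by injection heq.symm
          subst hmx
          by_cases hx : m < K
          · simp only [hx, if_true, hne1, if_false]
            -- after popping the minimum x, the heap is a permutation of y :: rest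
            have hp1 : (h.erase m).Perm (y :: rest) := by
              have := hp.erase m
              simpa using this
            have hsort' : (y :: rest).Pairwise (· ≤ ·) := (List.pairwise_cons.mp hsort).2
            have hmin2 : PySem.List.min? (h.erase m) (fun v => v) = some y :=
              min?_perm_sorted hp1 hsort'
            split
            · next heq2 => rw [hmin2] at heq2; exact absurd heq2 (by simp)
            · next s2 heq2 =>
              rw [hmin2] at heq2
              have hs2 : s2 = y := by injection heq2.symm
              subst hs2
              -- after popping y as well, the heap is a permutation of rest
              have hp2 : ((h.erase m).erase s2).Perm rest := by
                have := hp1.erase s2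
                simpa using this
              set c := m + 2 * s2 with hc
              have hcons : (((h.erase m).erase s2).concat c).Perm (c :: rest) := by
                simpa using (hp2.append_right [c]).trans List.perm_append_comm
              have hpush : (((h.erase m).erase s2).concat c).Perm
                  (PySem.List.insert rest (scanPos c rest) c) :=
                hcons.trans (ins_perm c rest).symm
              have hlen' : (((h.erase m).erase s2).concat c).length = n := by
                have := hp2.length_eq
                simp only [List.concat_eq_append, List.length_append, List.length_cons,
                  List.length_nil, this]
                omega
              have := ih _ _ K (ans + 1) hlen' hpush
                (ins_pairwise c rest (List.Pairwise.sublist (List.sublist_cons_self _ rest) hsort'))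
              simpa using this
          · simp [hx]

-- ===== VERDICT (by name: the statement is the Claim_ definition above) =====
theorem solution_spec : Claim_equal_solution := by
  intro scoville K _ _
  unfold Spec_solution solution solution_alt
  exact loop_eq scoville.length scoville _ K 0 rfl
    (PySem.List.sorted_perm scoville (fun x => x) false).symm
    (PySem.List.sorted_pairwise scoville (fun x => x))
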